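-- pv_equiv track=rewrite | github.com/Qing-ui/TCAlxy | TCAlxy2.0/CarbonScoreProcess.py | _get_environment_atoms
-- ===== SOURCE A (Python) =====
-- from typing import List, Tuple, Union
-- from collections import deque
-- from typing import Dict, List, Tuple
--
-- def _get_environment_atoms(
--
--         root: int,
--         graph: Dict[int, List[int]],
--         max_level: int
-- ) -> List[int]:
--     """获取多级环境原子（带连接有效性检查）"""
--     visited = set([root])
--     queue = deque([(root, 0)])
--     environment = []
--
--     while queue:
--         current_atom, current_level = queue.popleft()
--         if current_level >= max_level:
--             continue
--
--         for neighbor in graph.get(current_atom, []):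
--             if neighbor not in visited:
--                 visited.add(neighbor)
--                 environment.append(neighbor)
--                 queue.append((neighbor, current_level + 1))
--     return environment
-- ===== SOURCE B (Python) =====
-- from typing import Dict, List
--
--
-- def _get_environment_atoms(
--         root: int,
--         graph: Dict[int, List[int]],
--         max_level: int
-- ) -> List[int]:
--     """Level-synchronous BFS: one frontier list per hop, no deque, no per-node level tags."""
--     visited = {root}
--     environment = []
--     frontier = [root]
--     for _ in range(max_level):
--         if not frontier:
--             break
--         next_frontier = []
--         for atom in frontier:
--             for neighbor in graph.get(atom, []):
--                 if neighbor not in visited: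
--                     visited.add(neighbor)
--                     environment.append(neighbor)
--                     next_frontier.append(neighbor)
--         frontier = next_frontier
--     return environment
-- ===== Notes on version B (the rewrite author's own statement) =====
-- stated objective: simpler
-- what changed: Replaced the deque of (atom, level) pairs with level-synchronous BFS: a plain frontier list per hop driven by 'for _ in range(max_level)', removing the deque import and all per-node level bookkeeping.
import Mathlib
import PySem

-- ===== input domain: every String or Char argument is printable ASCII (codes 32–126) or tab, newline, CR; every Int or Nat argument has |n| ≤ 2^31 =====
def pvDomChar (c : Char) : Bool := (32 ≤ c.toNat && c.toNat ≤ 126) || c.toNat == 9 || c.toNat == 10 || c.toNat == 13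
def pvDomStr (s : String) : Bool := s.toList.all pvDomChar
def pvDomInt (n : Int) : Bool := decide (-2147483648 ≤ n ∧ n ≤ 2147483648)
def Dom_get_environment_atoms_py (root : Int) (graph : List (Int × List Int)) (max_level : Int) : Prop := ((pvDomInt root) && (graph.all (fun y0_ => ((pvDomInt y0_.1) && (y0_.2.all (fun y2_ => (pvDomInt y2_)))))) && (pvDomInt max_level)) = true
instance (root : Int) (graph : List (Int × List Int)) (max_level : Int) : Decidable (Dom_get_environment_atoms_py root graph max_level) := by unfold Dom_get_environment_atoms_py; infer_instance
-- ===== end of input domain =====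

-- B replaces A's deque of (atom, level) pairs with level-synchronous BFS (one frontier
-- list per hop), which is simpler: no deque, no per-node level bookkeeping.

-- ===== PORT A =====
-- pvCollect v nbs: the new (unvisited, deduplicated in order) neighbours among nbs, with the
-- updated visited list; shared characterisation of the inner neighbour loop of both ports.
def pvCollect (v : List Int) (nbs : List Int) : List Int × List Int :=
  match nbs with
  | [] => (v, [])
  | nb :: t =>
    if nb ∈ v then pvCollect v t
    else
      let r := pvCollect (v ++ [nb]) t
      (r.1, nb :: r.2)

-- the distinct atoms reachable as neighbours (used only as a termination measure for bfsA)
def pvU (g : List (Int × List Int)) : Finset Int := ((g.map Prod.snd).flatten).toFinset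

-- A's inner 'for neighbor in graph.get(current_atom, [])' loop, transliterated
def innerA (l : Int) (nbs : List Int) (s : PySem.Set Int × List Int × List (Int × Int)) :
    PySem.Set Int × List Int × List (Int × Int) :=
  nbs.foldl (fun s nb => if PySem.Set.contains s.1 nb then s
    else (PySem.Set.add s.1 nb, s.2.1 ++ [nb], s.2.2 ++ [(nb, l+1)])) s

-- A's inner loop factored through pvCollect (cited by bfsA's decreasing_by)
theorem pvFactorA (l : Int) : ∀ (nbs v env : List Int) (q : List (Int × Int)),
    innerA l nbs (v, env, q)
    = ((pvCollect v nbs).1, env ++ (pvCollect v nbs).2,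
       q ++ (pvCollect v nbs).2.map (fun x => (x, l+1))) := by
  intro nbs
  induction nbs with
  | nil => intro v env q; simp [innerA, pvCollect]
  | cons nb t ih =>
    intro v env q
    have hstep : innerA l (nb :: t) (v, env, q)
        = innerA l t (if PySem.Set.contains v nb then (v, env, q)
            else (PySem.Set.add v nb, env ++ [nb], q ++ [(nb, l+1)])) := rfl
    by_cases hm : nb ∈ v
    · have hc : PySem.Set.contains v nb = true := by
        simpa [PySem.Set.contains_iff] using hm
      rw [hstep, if_pos hc, ih]
      simp [pvCollect, hm]
    · have hc : ¬ PySem.Set.contains v nb = true := by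
        simp [hm]
      rw [hstep, if_neg hc, PySem.Set.add_of_not_mem hm, ih]
      simp [pvCollect, hm]

theorem pvCollect_spec : ∀ (nbs v : List Int),
    (pvCollect v nbs).1 = v ++ (pvCollect v nbs).2 ∧ (pvCollect v nbs).2.Nodup ∧
      ∀ x ∈ (pvCollect v nbs).2, x ∈ nbs ∧ x ∉ v := by
  intro nbs
  induction nbs with
  | nil => intro v; simp [pvCollect]
  | cons nb t ih =>
    intro v
    by_cases hm : nb ∈ v
    · obtain ⟨h1, h2, h3⟩ := ih v
      refine ⟨by simp [pvCollect, hm, h1], by simp [pvCollect, hm, h2], ?_⟩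
      intro x hx
      simp only [pvCollect, hm, if_pos] at hx
      exact ⟨List.mem_cons_of_mem _ (h3 x hx).1, (h3 x hx).2⟩
    · obtain ⟨h1, h2, h3⟩ := ih (v ++ [nb])
      have hnb : nb ∉ (pvCollect (v ++ [nb]) t).2 := fun hx => by
        have := (h3 nb hx).2; simp at this
      have hif : pvCollect v (nb :: t)
          = ((pvCollect (v ++ [nb]) t).1, nb :: (pvCollect (v ++ [nb]) t).2) := by
        simp [pvCollect, hm]
      refine ⟨?_, ?_, ?_⟩
      · rw [hif]; simp [h1]
      · rw [hif]
        exact List.nodup_cons.mpr ⟨hnb, h2⟩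
      · intro x hx
        rw [hif] at hx
        simp only [List.mem_cons] at hx
        rcases hx with rfl | hx
        · exact ⟨List.mem_cons_self, hm⟩
        · have := h3 x hx
          simp only [List.mem_append, List.mem_singleton] at this
          exact ⟨List.mem_cons_of_mem _ this.1, fun hv => this.2 (Or.inl hv)⟩

-- the neighbours looked up in the graph all lie in pvU
theorem pvGetD_subset (g : List (Int × List Int)) (a : Int) :
    ∀ x ∈ PySem.Dict.getD (PySem.Dict.mk g) a [], x ∈ (g.map Prod.snd).flatten := by
  induction g with
  | nil => intro x hx; simp [PySem.Dict.getD, PySem.Dict.get?] at hx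
  | cons p t ih =>
    intro x hx
    rw [PySem.Dict.getD_eq_get?_getD] at hx
    rcases p with ⟨k, vs⟩
    rw [PySem.Dict.get?_mk_cons] at hx
    by_cases hk : (k == a) = true
    · simp [hk] at hx; simp [hx]
    · simp only [hk] at hx
      have := ih x (by rw [PySem.Dict.getD_eq_get?_getD]; exact hx)
      simp only [List.map_cons, List.flatten_cons, List.mem_append]
      exact Or.inr this

-- measure step for the termination of bfsA
theorem pvMeasure (U : Finset Int) (v n : List Int) (hn : n.Nodup)
    (hsub : ∀ x ∈ n, x ∈ U ∧ x ∉ v) :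
    (U \ (v ++ n).toFinset).card + n.length = (U \ v.toFinset).card := by
  have hset : U \ (v ++ n).toFinset = (U \ v.toFinset) \ n.toFinset := by
    ext x; simp [List.mem_toFinset, Finset.mem_sdiff]; tauto
  have hss : n.toFinset ⊆ U \ v.toFinset := by
    intro x hx
    rw [List.mem_toFinset] at hx
    rcases hsub x hx with ⟨h1, h2⟩
    exact Finset.mem_sdiff.mpr ⟨h1, by simpa [List.mem_toFinset] using h2⟩
  have hcard := Finset.card_sdiff_add_card_eq_card hss
  have hlen : n.toFinset.card = n.length := List.toFinset_card_of_nodup hn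
  rw [hset]
  omega

-- A's while-queue loop, transliterated (termination by the measure above)
def bfsA (g : List (Int × List Int)) (M : Int) (q : List (Int × Int)) (v : List Int)
    (env : List Int) : List Int :=
  match q with
  | [] => env
  | (a, l) :: qt =>
    if l ≥ M then bfsA g M qt v env
    else
      let st := innerA l (PySem.Dict.getD (PySem.Dict.mk g) a []) (v, env, qt)
      bfsA g M st.2.2 st.1 st.2.1
termination_by 2 * ((pvU g) \ v.toFinset).card + q.length
decreasing_by
  · simp
  · rw [pvFactorA]
    obtain ⟨h1, h2, h3⟩ := pvCollect_spec (PySem.Dict.getD (PySem.Dict.mk g) a []) v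
    have hmeas := pvMeasure (pvU g) v (pvCollect v (PySem.Dict.getD (PySem.Dict.mk g) a [])).2 h2
      (fun x hx => ⟨by
        rw [pvU, List.mem_toFinset]
        exact pvGetD_subset g a x (h3 x hx).1, (h3 x hx).2⟩)
    simp only [h1]
    simp only [List.length_append, List.length_map, List.length_cons]
    omega

def get_environment_atoms_py (root : Int) (graph : List (Int × List Int)) (max_level : Int) :
    List Int :=
  bfsA graph max_level [(root, 0)] (PySem.Set.ofList [root]) []

-- ===== PORT B =====
-- B's inner 'for neighbor in graph.get(atom, [])' loop
def innerB (nbs : List Int) (s : PySem.Set Int × List Int × List Int) :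
    PySem.Set Int × List Int × List Int :=
  nbs.foldl (fun s nb => if PySem.Set.contains s.1 nb then s
    else (PySem.Set.add s.1 nb, s.2.1 ++ [nb], s.2.2 ++ [nb])) s

-- one frontier atom's pass of B
def levelStepB (g : List (Int × List Int)) (s : PySem.Set Int × List Int × List Int) (a : Int) :
    PySem.Set Int × List Int × List Int :=
  innerB (PySem.Dict.getD (PySem.Dict.mk g) a []) s

-- B's 'for _ in range(max_level)' loop: one level per step, early break on empty frontier
def bfsB (g : List (Int × List Int)) : Nat → List Int → List Int → List Int → List Int
  | 0, _, _, env => env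
  | k+1, f, v, env =>
    if f.isEmpty then env
    else
      let st := f.foldl (levelStepB g) (v, env, ([] : List Int))
      bfsB g k st.2.2 st.1 st.2.1

def get_environment_atoms_py_alt (root : Int) (graph : List (Int × List Int)) (max_level : Int) :
    List Int :=
  bfsB graph max_level.toNat [root] (PySem.Set.ofList [root]) []

-- ===== PRECONDITION & SPEC =====
def Spec_get_environment_atoms_py (root : Int) (graph : List (Int × List Int)) (max_level : Int) (out : List Int) : Prop := out = get_environment_atoms_py_alt root graph max_level
instance (root : Int) (graph : List (Int × List Int)) (max_level : Int) (out : List Int) : Decidable (Spec_get_environment_atoms_py root graph max_level out) := by unfold Spec_get_environment_atoms_py; infer_instance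

-- ===== CLAIM (what is proved, stated in full; the proofs are below) =====
def Claim_equal_get_environment_atoms_py : Prop := ∀ (root : Int) (graph : List (Int × List Int)) (max_level : Int), Dom_get_environment_atoms_py root graph max_level → Spec_get_environment_atoms_py root graph max_level (get_environment_atoms_py root graph max_level)

-- ===== LEMMAS AND PROOFS =====

-- B's inner loop factored through pvCollect
theorem pvFactorB : ∀ (nbs v env nf : List Int),
    innerB nbs (v, env, nf)
    = ((pvCollect v nbs).1, env ++ (pvCollect v nbs).2, nf ++ (pvCollect v nbs).2) := by
  intro nbs
  induction nbs with
  | nil => intro v env nf; simp [innerB, pvCollect]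
  | cons nb t ih =>
    intro v env nf
    have hstep : innerB (nb :: t) (v, env, nf)
        = innerB t (if PySem.Set.contains v nb then (v, env, nf)
            else (PySem.Set.add v nb, env ++ [nb], nf ++ [nb])) := rfl
    by_cases hm : nb ∈ v
    · have hc : PySem.Set.contains v nb = true := by
        simpa [PySem.Set.contains_iff] using hm
      rw [hstep, if_pos hc, ih]
      simp [pvCollect, hm]
    · have hc : ¬ PySem.Set.contains v nb = true := by
        simp [hm]
      rw [hstep, if_neg hc, PySem.Set.add_of_not_mem hm, ih]
      simp [pvCollect, hm]

-- a queue whose every level tag is ≥ M is drained without output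
theorem pvSkip (g : List (Int × List Int)) (M : Int) :
    ∀ (q : List (Int × Int)) (v env : List Int), (∀ p ∈ q, M ≤ p.2) →
      bfsA g M q v env = env := by
  intro q
  induction q with
  | nil => intro v env _; rw [bfsA]
  | cons p qt ih =>
    intro v env h
    rcases p with ⟨a, l⟩
    rw [bfsA]
    have hl : M ≤ l := h (a, l) List.mem_cons_self
    simp only [ge_iff_le, hl, if_true]
    exact ih v env (fun p hp => h p (List.mem_cons_of_mem _ hp))

-- one level of A's queue equals one frontier pass of B
theorem pvLevel (g : List (Int × List Int)) (M l : Int) (hl : l < M) :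
    ∀ (f n v env : List Int),
      bfsA g M (f.map (fun a => (a, l)) ++ n.map (fun a => (a, l+1))) v env
      = bfsA g M ((f.foldl (levelStepB g) (v, env, n)).2.2.map (fun a => (a, l+1)))
          (f.foldl (levelStepB g) (v, env, n)).1 (f.foldl (levelStepB g) (v, env, n)).2.1 := by
  intro f
  induction f with
  | nil => intro n v env; simp
  | cons a f ih =>
    intro n v env
    rw [List.map_cons, List.cons_append, bfsA]
    rw [if_neg (by omega : ¬ l ≥ M)]
    rw [pvFactorA]
    have hq : (f.map (fun a => (a, l)) ++ n.map (fun a => (a, l+1)))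
        ++ (pvCollect v (PySem.Dict.getD (PySem.Dict.mk g) a [])).2.map (fun x => (x, l+1))
        = f.map (fun a => (a, l))
          ++ (n ++ (pvCollect v (PySem.Dict.getD (PySem.Dict.mk g) a [])).2).map
              (fun a => (a, l+1)) := by
      simp [List.map_append]
    rw [hq, ih]
    rw [List.foldl_cons, levelStepB, pvFactorB]

-- the whole of A matches B level by level
theorem pvOuter (g : List (Int × List Int)) (M : Int) :
    ∀ (k : Nat) (l : Int), (M - l).toNat = k → ∀ (f v env : List Int),
      bfsA g M (f.map (fun a => (a, l))) v env = bfsB g k f v env := by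
  intro k
  induction k with
  | zero =>
    intro l hk f v env
    have hM : M ≤ l := by omega
    rw [bfsB, pvSkip]
    intro p hp
    simp only [List.mem_map] at hp
    obtain ⟨x, _, rfl⟩ := hp
    exact hM
  | succ k ih =>
    intro l hk f v env
    have hl : l < M := by omega
    cases f with
    | nil => rw [bfsB]; simp [bfsA]
    | cons a f =>
      rw [bfsB]
      simp only [List.isEmpty_cons, Bool.false_eq_true, if_false]
      have h0 : (a :: f).map (fun a => (a, l))
          = (a :: f).map (fun a => (a, l)) ++ ([] : List Int).map (fun a => (a, l+1)) := by simp
      rw [h0, pvLevel g M l hl]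
      exact ih (l + 1) (by omega) _ _ _

-- ===== VERDICT (by name: the statement is the Claim_ definition above) =====
theorem get_environment_atoms_py_spec : Claim_equal_get_environment_atoms_py := by
  intro root graph max_level _
  unfold Spec_get_environment_atoms_py get_environment_atoms_py get_environment_atoms_py_alt
  have h : [((root : Int), (0 : Int))] = [root].map (fun a => (a, (0:Int))) := by simp
  rw [h]
  exact pvOuter graph max_level max_level.toNat 0 (by simp) [root] _ []
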